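-- pv_equiv track=rewrite | github.com/tranquilo-01/Algorithms-and-Data-Structures-AGH-Course | ASDoffline2/proby.py | max_interval_depth
-- ===== SOURCE A (Python) =====
-- def max_interval_depth(intervals):
--     intervals_sorted = []
--     intlen = len(intervals)
--     for el in range(intlen):
--         intervals_sorted.append((intervals[el][0], el, 0))  # 0 for start of the interval
--         intervals_sorted.append((intervals[el][1], el, 1))  # 1 for end of the interval
--     intervals_sorted.sort()
--
--     sortlen = intlen * 2
--     starts = 0
--     ends = 0
--     e = 0
--     maxx = 0
--     starts_count = [0 for _ in range(intlen)]
--     ends_count = [0 for _ in range(intlen)]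
--     diff_count = [0 for _ in range(intlen)]
--     while e < sortlen:
--         point = intervals_sorted[e][0]
--         reference = point
--         ce = e
--         while point == reference:
--             if intervals_sorted[e][2] == 1:
--                 ends += 1
--                 e += 1
--             else:
--                 starts += 1
--                 e += 1
--             if e == sortlen:
--                 break
--             point = intervals_sorted[e][0]
--         while ce < e:
--             if intervals_sorted[ce][2] == 0:  # przy starcie
--                 starts_count[intervals_sorted[ce][1]] += starts - 1
--                 ends_count[intervals_sorted[ce][1]] += ends
--                 ce += 1
--             else:
--                 starts_count[intervals_sorted[ce][1]] += 0
--                 ends_count[intervals_sorted[ce][1]] += 0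
--                 # diff_count[intervals_sorted[ce][1]] = min(abs(starts - starts_count[intervals_sorted[ce][1]]), abs(ends - ends_count[intervals_sorted[ce][1]]))
--                 # if min(abs(starts - starts_count[intervals_sorted[ce][1]]), abs(ends - ends_count[intervals_sorted[ce][1]])) > maxx:
--                 #     maxx = min(abs(starts - starts_count[intervals_sorted[ce][1]]), abs(ends - ends_count[intervals_sorted[ce][1]]))
--                 ce += 1
--
--     return starts_count, ends_count
-- ===== SOURCE B (Python) =====
-- def max_interval_depth(intervals):
--     starts = [a for a, _ in intervals]
--     ends = [b for _, b in intervals]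
--     starts_count = [sum(1 for x in starts if x <= s) - 1 for s, _ in intervals]
--     ends_count = [sum(1 for x in ends if x <= s) for s, _ in intervals]
--     return starts_count, ends_count
-- ===== Notes on version B (the rewrite author's own statement) =====
-- stated objective: simpler
-- what changed: A sorts the 2n interval endpoints and runs a grouped two-level sweep accumulating start/end counters into index-addressed arrays; B computes each output directly as a per-interval count (number of starts <= this start, minus one, and number of ends <= this start) with no sort, no event list and no mutable arrays.
import Mathlib
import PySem

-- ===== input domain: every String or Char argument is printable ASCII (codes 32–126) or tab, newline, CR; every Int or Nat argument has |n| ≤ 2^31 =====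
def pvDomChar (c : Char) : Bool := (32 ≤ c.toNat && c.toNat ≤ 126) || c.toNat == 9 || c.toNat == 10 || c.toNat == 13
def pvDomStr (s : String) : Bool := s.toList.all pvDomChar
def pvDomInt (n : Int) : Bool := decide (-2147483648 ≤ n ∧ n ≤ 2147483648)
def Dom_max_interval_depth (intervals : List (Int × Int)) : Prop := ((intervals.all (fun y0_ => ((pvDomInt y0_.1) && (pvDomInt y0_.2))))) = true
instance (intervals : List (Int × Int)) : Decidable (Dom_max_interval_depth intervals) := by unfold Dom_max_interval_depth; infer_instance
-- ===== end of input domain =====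

-- B replaces A's sort-of-2n-endpoints + grouped double-while sweep by two direct
-- per-interval counts (count of starts ≤ start, count of ends ≤ start); objective: simpler.

-- ===== PORT A =====
-- the event list built by A's first loop: (value, index, 0) for starts, (value, index, 1) for ends
def pvEvents (intervals : List (Int × Int)) : List (Int × Int × Int) :=
  (PySem.List.enumerate intervals 0).foldl
    (fun acc ep => acc ++ [(ep.2.1, ep.1, 0), (ep.2.2, ep.1, 1)]) []

-- intervals_sorted.sort(): Python sorts 3-tuples lexicographically; ported as three
-- stable sorts, last key first, which by stability is exactly that lexicographic sort.
def pvSortEvents (es : List (Int × Int × Int)) : List (Int × Int × Int) :=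
  PySem.List.sorted
    (PySem.List.sorted (PySem.List.sorted es (fun q => q.2.2) false) (fun q => q.2.1) false)
    (fun q => q.1) false

-- l[i] += d  (every call site has 0 ≤ i < l.length)
def pvBump (l : List Int) (i : Int) (d : Int) : List Int :=
  l.set i.toNat (l.getD i.toNat 0 + d)

-- A's outer `while e < sortlen` as recursion on the remaining sorted suffix; the first
-- inner while (scan the maximal equal-value block, counting starts/ends) becomes the
-- takeWhile/dropWhile split plus the counting fold; the second inner while (ce..e) is
-- the fold over that block updating the two arrays.
def pvSweep (rem : List (Int × Int × Int)) (starts ends : Int)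
    (sc ec : List Int) : List Int × List Int :=
  match rem with
  | [] => (sc, ec)
  | q :: rest =>
    let block := q :: rest.takeWhile (fun r => r.1 == q.1)
    let rest' := rest.dropWhile (fun r => r.1 == q.1)
    let se := block.foldl
      (fun p r => if r.2.2 = 1 then (p.1, p.2 + 1) else (p.1 + 1, p.2)) (starts, ends)
    let arrs := block.foldl
      (fun p r => if r.2.2 = 0 then (pvBump p.1 r.2.1 (se.1 - 1), pvBump p.2 r.2.1 se.2) else p)
      (sc, ec)
    pvSweep rest' se.1 se.2 arrs.1 arrs.2
termination_by rem.length
decreasing_by simpa using Nat.lt_succ_of_le (List.length_dropWhile_le _ _)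

def max_interval_depth (intervals : List (Int × Int)) : List Int × List Int :=
  pvSweep (pvSortEvents (pvEvents intervals)) 0 0
    (List.replicate intervals.length 0) (List.replicate intervals.length 0)

-- ===== PORT B =====
def max_interval_depth_alt (intervals : List (Int × Int)) : List Int × List Int :=
  let starts := intervals.map (fun p => p.1)
  let ends := intervals.map (fun p => p.2)
  (intervals.map (fun p => (starts.countP (fun x => decide (x ≤ p.1)) : Int) - 1),
   intervals.map (fun p => (ends.countP (fun x => decide (x ≤ p.1)) : Int)))

-- ===== PRECONDITION & SPEC =====
def Spec_max_interval_depth (intervals : List (Int × Int)) (out : List Int × List Int) : Prop := out = max_interval_depth_alt intervals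
instance (intervals : List (Int × Int)) (out : List Int × List Int) : Decidable (Spec_max_interval_depth intervals out) := by unfold Spec_max_interval_depth; infer_instance

-- ===== CLAIM (what is proved, stated in full; the proofs are below) =====
def Claim_equal_max_interval_depth : Prop := ∀ (intervals : List (Int × Int)), Dom_max_interval_depth intervals → Spec_max_interval_depth intervals (max_interval_depth intervals)

-- ===== LEMMAS AND PROOFS =====

-- abstract shape of the array-updating step of pvSweep's second inner loop
def pvScStep (δ : Int × Int × Int → Int) (a : List Int) (q : Int × Int × Int) : List Int :=
  if q.2.2 = 0 then pvBump a q.2.1 (δ q) else a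

-- number of start events (resp. end events) of L with value ≤ v
def pvCntS (L : List (Int × Int × Int)) (v : Int) : Int :=
  (L.countP (fun q => !(q.2.2 == 1) && decide (q.1 ≤ v)) : Int)
def pvCntE (L : List (Int × Int × Int)) (v : Int) : Int :=
  (L.countP (fun q => (q.2.2 == 1) && decide (q.1 ≤ v)) : Int)

lemma pvSweep_eq (n : Nat) (L : List (Int × Int × Int)) (hn : L.length ≤ n)
    (hs : L.Pairwise (fun a b => a.1 ≤ b.1)) (s0 e0 : Int) (sc ec : List Int) :
    pvSweep L s0 e0 sc ec =
      (L.foldl (pvScStep (fun q => s0 + pvCntS L q.1 - 1)) sc,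
       L.foldl (pvScStep (fun q => e0 + pvCntE L q.1)) ec) := by
  induction n generalizing L s0 e0 sc ec with
  | zero =>
    have : L = [] := by cases L <;> simp_all
    subst this; rw [pvSweep]; simp
  | succ m ih =>
    cases L with
    | nil => rw [pvSweep]; simp
    | cons q rest =>
      obtain ⟨h1, h2⟩ := List.pairwise_cons.mp hs
      set p : Int × Int × Int → Bool := fun r => r.1 == q.1 with hp
      set tw := rest.takeWhile p with htw
      set dw := rest.dropWhile p with hdw
      set block : List (Int × Int × Int) := q :: tw with hblock
      have hsplit : rest = tw ++ dw := (List.takeWhile_append_dropWhile).symm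
      have hL : q :: rest = block ++ dw := by rw [hblock, hsplit]; simp
      have hblockv : ∀ r ∈ block, r.1 = q.1 := by
        intro r hr
        rcases List.mem_cons.mp hr with h | h
        · rw [h]
        · simpa [hp] using List.mem_takeWhile_imp h
      have hdw_sub : dw.Sublist rest := List.dropWhile_sublist p
      have hdw_pair : dw.Pairwise (fun a b => a.1 ≤ b.1) := List.Pairwise.sublist hdw_sub h2
      have hdw_gt : ∀ r ∈ dw, q.1 < r.1 := by
        cases hdwc : dw with
        | nil => intro r hr; simp at hr
        | cons d ds =>
          have hdrop : List.dropWhile p rest = d :: ds := by rw [← hdw]; exact hdwc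
          have hdfalse : p d = false := by
            have := List.head_dropWhile_not p (l := rest) (by simp [hdrop])
            simpa [hdrop] using this
          have hdq : q.1 < d.1 := by
            have hmem : d ∈ rest := hdw_sub.mem (by rw [hdwc]; exact List.mem_cons_self)
            have := h1 d hmem
            have hne : ¬ (d.1 = q.1) := by simpa [hp] using hdfalse
            omega
          intro r hr
          rcases List.mem_cons.mp hr with h | h
          · rw [h]; exact hdq
          · have hpp := hdw_pair
            rw [hdwc] at hpp
            have : d.1 ≤ r.1 := (List.pairwise_cons.mp hpp).1 r h
            omega
      -- counting fold
      have hcount : ∀ (a b : Int),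
          block.foldl (fun p r => if r.2.2 = 1 then (p.1, p.2 + 1) else (p.1 + 1, p.2)) (a, b)
            = (a + (block.countP (fun r => !(r.2.2 == 1)) : Int),
               b + (block.countP (fun r => r.2.2 == 1) : Int)) := by
        intro a b
        have hfun : (fun (p : Int × Int) (r : Int × Int × Int) =>
            if r.2.2 = 1 then (p.1, p.2 + 1) else (p.1 + 1, p.2))
          = (fun p r => ((fun (x : Int) r => if !(r.2.2 == 1) then x + 1 else x) p.1 r,
                         (fun (x : Int) r => if (r.2.2 == 1) then x + 1 else x) p.2 r)) := by
          funext p r; by_cases h : r.2.2 = 1 <;> simp [h]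
        rw [hfun, PySem.List.foldl_prod_mk
            (fun (x : Int) (r : Int × Int × Int) => if !(r.2.2 == 1) then x + 1 else x)
            (fun (x : Int) (r : Int × Int × Int) => if (r.2.2 == 1) then x + 1 else x),
          PySem.List.foldl_count_if, PySem.List.foldl_count_if]
      -- array fold split
      have harr : ∀ (S E : Int) (sc ec : List Int),
          block.foldl (fun p r => if r.2.2 = 0 then
              (pvBump p.1 r.2.1 (S - 1), pvBump p.2 r.2.1 E) else p) (sc, ec)
            = (block.foldl (pvScStep (fun _ => S - 1)) sc,
               block.foldl (pvScStep (fun _ => E)) ec) := by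
        intro S E sc ec
        have hfun : (fun (p : List Int × List Int) (r : Int × Int × Int) =>
            if r.2.2 = 0 then (pvBump p.1 r.2.1 (S - 1), pvBump p.2 r.2.1 E) else p)
          = (fun p r => (pvScStep (fun _ => S - 1) p.1 r, pvScStep (fun _ => E) p.2 r)) := by
          funext p r; by_cases h : r.2.2 = 0 <;> simp [pvScStep, h]
        rw [hfun, PySem.List.foldl_prod_mk
            (pvScStep (fun _ => S - 1)) (pvScStep (fun _ => E))]
      have hdwlen : dw.length ≤ m := by
        have := List.length_dropWhile_le p rest
        have : dw.length ≤ rest.length := by rw [hdw]; exact List.length_dropWhile_le p rest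
        simp at hn
        omega
      rw [pvSweep]
      simp only [← hp, ← htw, ← hdw, ← hblock]
      rw [hcount, harr, ih dw hdwlen hdw_pair]
      -- abbreviations
      set S : Int := s0 + (block.countP (fun r => !(r.2.2 == 1)) : Int) with hS
      set E : Int := e0 + (block.countP (fun r => r.2.2 == 1) : Int) with hE
      -- count decomposition facts
      have hcntS_block : ∀ r ∈ block, pvCntS (q :: rest) r.1 = S - s0 := by
        intro r hr
        rw [hblockv r hr]
        have : (q :: rest) = block ++ dw := hL
        rw [this]
        unfold pvCntS
        rw [List.countP_append]
        have hdz : dw.countP (fun r => !(r.2.2 == 1) && decide (r.1 ≤ q.1)) = 0 := by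
          rw [List.countP_eq_zero]
          intro r hr
          have := hdw_gt r hr
          simp [show ¬ (r.1 ≤ q.1) by omega]
        have hbz : block.countP (fun r => !(r.2.2 == 1) && decide (r.1 ≤ q.1))
            = block.countP (fun r => !(r.2.2 == 1)) := by
          apply List.countP_congr
          intro r hr
          simp [hblockv r hr]
        rw [hdz, hbz, hS]
        push_cast
        ring
      have hcntE_block : ∀ r ∈ block, pvCntE (q :: rest) r.1 = E - e0 := by
        intro r hr
        rw [hblockv r hr, hL]
        unfold pvCntE
        rw [List.countP_append]
        have hdz : dw.countP (fun r => (r.2.2 == 1) && decide (r.1 ≤ q.1)) = 0 := by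
          rw [List.countP_eq_zero]
          intro r hr
          have := hdw_gt r hr
          simp [show ¬ (r.1 ≤ q.1) by omega]
        have hbz : block.countP (fun r => (r.2.2 == 1) && decide (r.1 ≤ q.1))
            = block.countP (fun r => (r.2.2 == 1)) := by
          apply List.countP_congr
          intro r hr
          simp [hblockv r hr]
        rw [hdz, hbz, hE]
        push_cast
        ring
      have hcntS_dw : ∀ r ∈ dw, pvCntS (q :: rest) r.1 = (S - s0) + pvCntS dw r.1 := by
        intro r hr
        have hrgt := hdw_gt r hr
        rw [hL]
        unfold pvCntS
        rw [List.countP_append]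
        have hbe : block.countP (fun x => !(x.2.2 == 1) && decide (x.1 ≤ r.1))
            = block.countP (fun x => !(x.2.2 == 1)) := by
          apply List.countP_congr
          intro x hx
          have := hblockv x hx
          simp [this, show q.1 ≤ r.1 by omega]
        rw [hbe, hS]
        push_cast
        ring
      have hcntE_dw : ∀ r ∈ dw, pvCntE (q :: rest) r.1 = (E - e0) + pvCntE dw r.1 := by
        intro r hr
        have hrgt := hdw_gt r hr
        rw [hL]
        unfold pvCntE
        rw [List.countP_append]
        have hbe : block.countP (fun x => (x.2.2 == 1) && decide (x.1 ≤ r.1))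
            = block.countP (fun x => (x.2.2 == 1)) := by
          apply List.countP_congr
          intro x hx
          have := hblockv x hx
          simp [this, show q.1 ≤ r.1 by omega]
        rw [hbe, hE]
        push_cast
        ring
      -- now assemble both components
      have hLfold : ∀ (δ : Int × Int × Int → Int) (init : List Int),
          (q :: rest).foldl (pvScStep δ) init
            = dw.foldl (pvScStep δ) (block.foldl (pvScStep δ) init) := by
        intro δ init
        rw [hL, List.foldl_append]
      dsimp only
      have hfold_block_S : block.foldl (pvScStep (fun r => s0 + pvCntS (q :: rest) r.1 - 1)) sc
          = block.foldl (pvScStep (fun _ => S - 1)) sc := by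
        apply PySem.List.foldl_congr_mem
        intro acc r hr
        simp only [pvScStep]
        by_cases h : r.2.2 = 0
        · simp only [if_pos h, hcntS_block r hr]
          congr 1
          ring
        · simp [h]
      have hfold_block_E : block.foldl (pvScStep (fun r => e0 + pvCntE (q :: rest) r.1)) ec
          = block.foldl (pvScStep (fun _ => E)) ec := by
        apply PySem.List.foldl_congr_mem
        intro acc r hr
        simp only [pvScStep]
        by_cases h : r.2.2 = 0
        · simp only [if_pos h, hcntE_block r hr]
          congr 1
          ring
        · simp [h]
      have hfold_dw_S : ∀ init, dw.foldl (pvScStep (fun r => s0 + pvCntS (q :: rest) r.1 - 1)) init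
          = dw.foldl (pvScStep (fun r => S + pvCntS dw r.1 - 1)) init := by
        intro init
        apply PySem.List.foldl_congr_mem
        intro acc r hr
        simp only [pvScStep]
        by_cases h : r.2.2 = 0
        · simp only [if_pos h, hcntS_dw r hr]
          congr 1
          ring
        · simp [h]
      have hfold_dw_E : ∀ init, dw.foldl (pvScStep (fun r => e0 + pvCntE (q :: rest) r.1)) init
          = dw.foldl (pvScStep (fun r => E + pvCntE dw r.1)) init := by
        intro init
        apply PySem.List.foldl_congr_mem
        intro acc r hr
        simp only [pvScStep]
        by_cases h : r.2.2 = 0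
        · simp only [if_pos h, hcntE_dw r hr]
          congr 1
          ring
        · simp [h]
      simp only [Prod.mk.injEq]
      refine ⟨?_, ?_⟩
      · rw [hLfold, hfold_block_S, hfold_dw_S]
      · rw [hLfold, hfold_block_E, hfold_dw_E]

lemma pvScStep_length (δ : Int × Int × Int → Int) (Q : List (Int × Int × Int)) (a : List Int) :
    (Q.foldl (pvScStep δ) a).length = a.length := by
  induction Q generalizing a with
  | nil => rfl
  | cons q Q ih => rw [List.foldl_cons, ih]; unfold pvScStep pvBump; split <;> simp

lemma pvScStep_getElem? (δ : Int × Int × Int → Int) (Q : List (Int × Int × Int))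
    (hQ : ∀ q ∈ Q, 0 ≤ q.2.1) (a : List Int) (k : Nat) (hk : k < a.length) :
    (Q.foldl (pvScStep δ) a)[k]? =
      some (a[k] + ((Q.filter (fun q => q.2.2 == 0 && q.2.1 == (k : Int))).map δ).sum) := by
  induction Q generalizing a with
  | nil => simp [List.getElem?_eq_getElem hk]
  | cons q Q ih =>
    have hq0 : 0 ≤ q.2.1 := hQ q List.mem_cons_self
    have hlen : (pvScStep δ a q).length = a.length := by
      unfold pvScStep pvBump; split <;> simp
    have hk' : k < (pvScStep δ a q).length := by rw [hlen]; exact hk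
    rw [List.foldl_cons, ih (fun r hr => hQ r (List.mem_cons_of_mem _ hr)) _ hk']
    have key : ∀ v : Int, (pvScStep δ a q)[k]? = some v → (pvScStep δ a q)[k]'hk' = v :=
      fun v h => Option.some.inj ((List.getElem?_eq_getElem hk').symm.trans h)
    by_cases ht : q.2.2 = 0
    · by_cases hik : q.2.1 = (k : Int)
      · have hitn : q.2.1.toNat = k := by omega
        have hset : (pvScStep δ a q)[k]'hk' = a[k] + δ q :=
          key _ (by simp [pvScStep, pvBump, ht, hitn, hk])
        rw [hset, List.filter_cons]
        simp only [ht, hik]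
        simp
        ring
      · have hset : (pvScStep δ a q)[k]'hk' = a[k] :=
          key _ (by simp [pvScStep, pvBump, ht,
            show ¬ q.2.1.toNat = k by omega, List.getElem?_eq_getElem hk])
        rw [hset, List.filter_cons]
        simp [ht, hik]
    · have hset : (pvScStep δ a q)[k]'hk' = a[k] :=
        key _ (by simp [pvScStep, ht, List.getElem?_eq_getElem hk])
      rw [hset, List.filter_cons]
      have hb : (q.2.2 == 0 && q.2.1 == (k:Int)) = false := by simp [ht]
      simp [hb]

lemma pvEvents_flat (intervals : List (Int × Int)) :
    pvEvents intervals =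
      (PySem.List.enumerate intervals 0).flatMap (fun ep => [(ep.2.1, ep.1, 0), (ep.2.2, ep.1, 1)]) := by
  unfold pvEvents
  rw [PySem.List.foldl_append_eq_flatMap]
  simp

lemma pvEvents_idx_nonneg (intervals : List (Int × Int)) :
    ∀ q ∈ pvEvents intervals, 0 ≤ q.2.1 := by
  rw [pvEvents_flat]
  intro q hq
  rw [List.mem_flatMap] at hq
  obtain ⟨ep, hep, hq⟩ := hq
  rw [PySem.List.mem_enumerate_iff] at hep
  obtain ⟨k, hk, rfl⟩ := hep
  simp at hq
  rcases hq with h | h <;> simp [h]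

lemma pvCnt_enum (p : Int × Int × Int → Bool) (g : Int × Int → Bool)
    (hp : ∀ (x : Int × Int) (j : Int), (List.countP p [(x.1, j, (0:Int)), (x.2, j, 1)] : Nat) = if g x then 1 else 0)
    (intervals : List (Int × Int)) : ∀ s : Int,
    (((PySem.List.enumerate intervals s).flatMap (fun ep => [(ep.2.1, ep.1, (0:Int)), (ep.2.2, ep.1, 1)])).countP p)
      = intervals.countP g := by
  induction intervals with
  | nil => intro s; simp [PySem.List.enumerate_nil]
  | cons x xs ih =>
    intro s
    rw [PySem.List.enumerate_cons, List.flatMap_cons, List.countP_append, ih (s+1), hp x s,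
      List.countP_cons]
    by_cases h : g x <;> simp [h] <;> omega

lemma pvCntS_events (intervals : List (Int × Int)) (v : Int) :
    pvCntS (pvEvents intervals) v = ((intervals.map (fun p => p.1)).countP (fun x => decide (x ≤ v)) : Int) := by
  unfold pvCntS
  rw [pvEvents_flat, pvCnt_enum _ (fun x => decide (x.1 ≤ v)) (by intro x j; simp [List.countP_cons]),
    List.countP_map]
  rfl

lemma pvCntE_events (intervals : List (Int × Int)) (v : Int) :
    pvCntE (pvEvents intervals) v = ((intervals.map (fun p => p.2)).countP (fun x => decide (x ≤ v)) : Int) := by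
  unfold pvCntE
  rw [pvEvents_flat, pvCnt_enum _ (fun x => decide (x.2 ≤ v)) (by intro x j; simp [List.countP_cons]),
    List.countP_map]
  rfl

lemma pvFilter_enum (intervals : List (Int × Int)) : ∀ (s : Int) (k : Nat) (hk : k < intervals.length),
    ((PySem.List.enumerate intervals s).flatMap (fun ep => [(ep.2.1, ep.1, (0:Int)), (ep.2.2, ep.1, 1)])).filter
        (fun q => q.2.2 == 0 && q.2.1 == (s + k : Int)) =
      [((intervals[k]).1, (s + k : Int), 0)] := by
  induction intervals with
  | nil => intro s k hk; simp at hk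
  | cons x xs ih =>
    intro s k hk
    rw [PySem.List.enumerate_cons, List.flatMap_cons, List.filter_append]
    cases k with
    | zero =>
      have h1 : ((PySem.List.enumerate xs (s+1)).flatMap (fun ep => [(ep.2.1, ep.1, (0:Int)), (ep.2.2, ep.1, 1)])).filter
        (fun q => q.2.2 == 0 && q.2.1 == (s + (0:Nat) : Int)) = [] := by
        rw [List.filter_eq_nil_iff]
        intro q hq
        rw [List.mem_flatMap] at hq
        obtain ⟨ep, hep, hq⟩ := hq
        rw [PySem.List.mem_enumerate_iff] at hep
        obtain ⟨j, hj, rfl⟩ := hep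
        simp at hq ⊢
        rcases hq with h | h <;> simp [h] <;> intro _ <;> omega
      rw [h1]
      simp
    | succ k' =>
      have h0 : (List.filter (fun q => q.2.2 == 0 && q.2.1 == (s + ((k'+1:Nat)) : Int)) [(x.1, s, (0:Int)), (x.2, s, 1)]) = [] := by
        simp; omega
      rw [h0, List.nil_append]
      have := ih (s+1) k' (by simpa using hk)
      rw [show (s + ((k'+1:Nat) : Int)) = (s+1) + (k' : Int) by push_cast; ring]
      simpa using this

lemma pvEvents_filter (intervals : List (Int × Int)) (k : Nat) (hk : k < intervals.length) :
    (pvEvents intervals).filter (fun q => q.2.2 == 0 && q.2.1 == (k : Int)) =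
      [((intervals[k]).1, (k : Int), 0)] := by
  rw [pvEvents_flat]
  have := pvFilter_enum intervals 0 k hk
  simpa using this

lemma pvSort_perm (es : List (Int × Int × Int)) : (pvSortEvents es).Perm es := by
  unfold pvSortEvents
  exact ((PySem.List.sorted_perm _ _ _).trans (PySem.List.sorted_perm _ _ _)).trans
    (PySem.List.sorted_perm _ _ _)

lemma pvSort_pairwise (es : List (Int × Int × Int)) :
    (pvSortEvents es).Pairwise (fun a b => a.1 ≤ b.1) := by
  unfold pvSortEvents
  exact PySem.List.sorted_pairwise _ _

-- ===== VERDICT (by name: the statement is the Claim_ definition above) =====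
theorem max_interval_depth_spec : Claim_equal_max_interval_depth := by
  intro iv _
  unfold Spec_max_interval_depth max_interval_depth max_interval_depth_alt
  have hperm := pvSort_perm (pvEvents iv)
  have hpair := pvSort_pairwise (pvEvents iv)
  set L := pvSortEvents (pvEvents iv) with hLdef
  set n := iv.length with hn
  rw [pvSweep_eq L.length L le_rfl hpair]
  have hQ : ∀ q ∈ L, 0 ≤ q.2.1 := fun q hq => pvEvents_idx_nonneg iv q (hperm.mem_iff.mp hq)
  simp only [Prod.mk.injEq]
  constructor
  · apply List.ext_getElem?
    intro k
    by_cases hk : k < n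
    · rw [pvScStep_getElem? _ L hQ _ k (by simp [hk]),
        List.getElem?_map, List.getElem?_eq_getElem hk]
      have hfilt : (L.filter (fun q => q.2.2 == 0 && q.2.1 == (k : Int))).Perm
          ((pvEvents iv).filter (fun q => q.2.2 == 0 && q.2.1 == (k : Int))) :=
        hperm.filter _
      have hsum : ((L.filter (fun q => q.2.2 == 0 && q.2.1 == (k : Int))).map
            (fun q => 0 + pvCntS L q.1 - 1)).sum
          = pvCntS L (iv[k]).1 - 1 := by
        rw [List.Perm.sum_eq (hfilt.map _), pvEvents_filter iv k hk]
        simp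
      simp only [hsum]
      have hcnt : pvCntS L (iv[k]).1 = ((iv.map (fun p => p.1)).countP (fun x => decide (x ≤ (iv[k]).1)) : Int) := by
        unfold pvCntS
        rw [hperm.countP_eq]
        exact pvCntS_events iv (iv[k]).1
      rw [hcnt]
      simp
    · have h1 : (L.foldl (pvScStep (fun q => 0 + pvCntS L q.1 - 1)) (List.replicate n 0)).length = n := by
        rw [pvScStep_length]; simp
      rw [List.getElem?_eq_none (by omega), List.getElem?_eq_none (by simp; omega)]
  · apply List.ext_getElem?
    intro k
    by_cases hk : k < n
    · rw [pvScStep_getElem? _ L hQ _ k (by simp [hk]),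
        List.getElem?_map, List.getElem?_eq_getElem hk]
      have hfilt : (L.filter (fun q => q.2.2 == 0 && q.2.1 == (k : Int))).Perm
          ((pvEvents iv).filter (fun q => q.2.2 == 0 && q.2.1 == (k : Int))) :=
        hperm.filter _
      have hsum : ((L.filter (fun q => q.2.2 == 0 && q.2.1 == (k : Int))).map
            (fun q => 0 + pvCntE L q.1)).sum
          = pvCntE L (iv[k]).1 := by
        rw [List.Perm.sum_eq (hfilt.map _), pvEvents_filter iv k hk]
        simp
      simp only [hsum]
      have hcnt : pvCntE L (iv[k]).1 = ((iv.map (fun p => p.2)).countP (fun x => decide (x ≤ (iv[k]).1)) : Int) := by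
        unfold pvCntE
        rw [hperm.countP_eq]
        exact pvCntE_events iv (iv[k]).1
      rw [hcnt]
      simp
    · have h1 : (L.foldl (pvScStep (fun q => 0 + pvCntE L q.1)) (List.replicate n 0)).length = n := by
        rw [pvScStep_length]; simp
      rw [List.getElem?_eq_none (by omega), List.getElem?_eq_none (by simp; omega)]
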